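-- pv_equiv track=rewrite | github.com/gnahtb/Code-Archive | HackerRank/fair-cut.py | fairCut
-- ===== SOURCE A (Python) =====
-- def fairCut(k, arr):
--     arr.sort()
--     n = len(arr)
--     f = [[int(1e18)] * (k + 2) for i in range(n + 2)]
--     f[0][0] = 0
--     for i in range(1, n + 1):
--         for j in range(k + 1):
--             # Li does pick
--             if j:
--                 f[i][j] = min(f[i][j], f[i - 1][j - 1] + arr[i - 1] * ((i - j) * 2 - n + k))
--             # Li does not pick
--             f[i][j] = min(f[i][j], f[i - 1][j] + arr[i - 1] * (j * 2 - k))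
--     return f[n][k]
-- ===== SOURCE B (Python) =====
-- def fairCut(k, arr):
--     # Top-down memoized recursion over the same recurrence (same 10**18 sentinel);
--     # like A it sorts arr in place.
--     arr.sort()
--     n = len(arr)
--     INF = 10 ** 18
--     memo = {}
--
--     def solve(i, j):
--         key = (i, j)
--         if key in memo:
--             return memo[key]
--         if i == 0:
--             r = 0 if j == 0 else INF
--         else:
--             r = INF
--             if j:
--                 r = min(r, solve(i - 1, j - 1) + arr[i - 1] * ((i - j) * 2 - n + k))
--             r = min(r, solve(i - 1, j) + arr[i - 1] * (j * 2 - k))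
--         memo[key] = r
--         return r
--
--     return solve(n, k)
-- ===== Notes on version B (the rewrite author's own statement) =====
-- stated objective: alternative
-- what changed: Replaces A's bottom-up (n+2)x(k+2) DP table with top-down memoized recursion (dict cache) over the same recurrence, visiting only states reachable from (n, k).
-- outside the precondition, e.g. on fairCut(-1, [1]): A returns 1000000000000000000, B returns 999999999999999999
import Mathlib
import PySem

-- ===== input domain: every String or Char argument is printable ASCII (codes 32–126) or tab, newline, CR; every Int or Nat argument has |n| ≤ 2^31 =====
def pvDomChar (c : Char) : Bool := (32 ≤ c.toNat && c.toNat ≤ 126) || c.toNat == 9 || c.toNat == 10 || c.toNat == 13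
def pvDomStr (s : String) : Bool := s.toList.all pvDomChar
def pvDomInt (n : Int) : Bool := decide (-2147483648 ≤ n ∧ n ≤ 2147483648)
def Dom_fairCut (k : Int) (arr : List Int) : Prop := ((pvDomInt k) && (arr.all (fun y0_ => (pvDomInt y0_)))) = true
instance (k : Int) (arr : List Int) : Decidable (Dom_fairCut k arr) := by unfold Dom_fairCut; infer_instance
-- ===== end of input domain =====

-- B replaces A's bottom-up (n+2)×(k+2) DP table with top-down memoized recursion over the
-- same recurrence (same 10^18 sentinel). Both Pythons sort arr in place (arr.sort());
-- the equivalence proved here is about the return value.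

-- ===== PORT A =====
-- One inner-loop body of A: the two in-place updates of f[i][j]. The (n+2)*(k+2) table is
-- stored as a flat Array Int, cell (i, j) at index i*(k+2)+j â exact for the in-range
-- accesses A makes under Pre_ (0 <= k).
def pvStepA (s : List Int) (n k i j : Int) (f : Array Int) : Array Int :=
  let w : Int := k + 2
  -- if j: f[i][j] = min(f[i][j], f[i-1][j-1] + arr[i-1]*((i-j)*2-n+k))
  let f1 :=
    if j ≠ 0 then
      f.setIfInBounds (i * w + j).toNat
        (min (f.getD (i * w + j).toNat 0)
          (f.getD ((i - 1) * w + (j - 1)).toNat 0 +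
            PySem.List.pyGetD s (i - 1) 0 * ((i - j) * 2 - n + k)))
    else f
  -- f[i][j] = min(f[i][j], f[i-1][j] + arr[i-1]*(j*2-k))
  f1.setIfInBounds (i * w + j).toNat
    (min (f1.getD (i * w + j).toNat 0)
      (f1.getD ((i - 1) * w + j).toNat 0 + PySem.List.pyGetD s (i - 1) 0 * (j * 2 - k)))

def fairCut (k : Int) (arr : List Int) : Int :=
  let s := PySem.List.sorted arr id            -- arr.sort()
  let n : Int := (s.length : Int)
  let w : Int := k + 2
  -- f = [[int(1e18)]*(k+2) for i in range(n+2)]; f[0][0] = 0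
  let f0 : Array Int := Array.replicate ((n + 2) * w).toNat 1000000000000000000
  let f0 := f0.setIfInBounds (0 * w + 0).toNat 0
  let fN := (PySem.List.pyRange 1 (n + 1) 1).foldl
      (fun f i => (PySem.List.pyRange 0 (k + 1) 1).foldl (fun f j => pvStepA s n k i j f) f) f0
  fN.getD (n * w + k).toNat 0                  -- return f[n][k]

-- ===== PORT B =====
-- solve(i, j) of Source B, with the memo dict threaded through explicitly.
def pvSolveB (s : List Int) (n k : Int) :
    Nat → Int → PySem.Dict (Int × Int) Int → Int × PySem.Dict (Int × Int) Int
  | i, j, memo =>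
    match PySem.Dict.get? memo ((i : Int), j) with
    | some r => (r, memo)                       -- if key in memo: return memo[key]
    | none =>
      match i with
      | 0 =>
        let r : Int := if j = 0 then 0 else 1000000000000000000
        (r, PySem.Dict.insert memo ((0 : Int), j) r)
      | i' + 1 =>
        -- r = INF; if j: r = min(r, solve(i-1, j-1) + arr[i-1]*((i-j)*2-n+k))
        let p : Int × PySem.Dict (Int × Int) Int :=
          if j ≠ 0 then
            let q := pvSolveB s n k i' (j - 1) memo
            (min 1000000000000000000
                (q.1 + PySem.List.pyGetD s ((i' : Int)) 0 * ((((i' : Int) + 1) - j) * 2 - n + k)),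
              q.2)
          else (1000000000000000000, memo)
        -- r = min(r, solve(i-1, j) + arr[i-1]*(j*2-k)); memo[key] = r
        let q2 := pvSolveB s n k i' j p.2
        let r := min p.1 (q2.1 + PySem.List.pyGetD s ((i' : Int)) 0 * (j * 2 - k))
        (r, PySem.Dict.insert q2.2 (((i' : Int) + 1), j) r)

def fairCut_alt (k : Int) (arr : List Int) : Int :=
  let s := PySem.List.sorted arr id            -- arr.sort()
  let n : Int := (s.length : Int)
  (pvSolveB s n k s.length k PySem.Dict.empty).1   -- return solve(n, k)

-- ===== PRECONDITION & SPEC =====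
-- Pre_ excludes negative k, outside the problem's natural domain: there A raises IndexError
-- (k ≤ -2, f[0][0] on an empty row) or returns the sentinel via accidental negative-index
-- wraparound in f[n][k] (k = -1).
def Pre_fairCut (k : Int) (_arr : List Int) : Prop := 0 ≤ k
instance (k : Int) (arr : List Int) : Decidable (Pre_fairCut k arr) := by
  unfold Pre_fairCut; infer_instance
def pvWitness_fairCut : Int × List Int := (1, [3, -2, 5])
def Spec_fairCut (k : Int) (arr : List Int) (out : Int) : Prop := out = fairCut_alt k arr
instance (k : Int) (arr : List Int) (out : Int) : Decidable (Spec_fairCut k arr out) := by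
  unfold Spec_fairCut; infer_instance

-- ===== CLAIM (what is proved, stated in full; the proofs are below) =====
def Claim_equal_fairCut : Prop :=
  ∀ (k : Int) (arr : List Int), Dom_fairCut k arr → Pre_fairCut k arr →
    Spec_fairCut k arr (fairCut k arr)

-- ===== LEMMAS AND PROOFS =====

-- The mathematical recurrence both programs compute: F i j = cost table value for the
-- first i sorted elements with j picked (sentinel 10^18 on states A's table leaves at it).
def pvF (s : List Int) (k : Int) : Nat → Int → Int
  | 0, j => if j = 0 then 0 else 1000000000000000000
  | i + 1, j =>
    let pick :=
      if j ≠ 0 then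
        min 1000000000000000000
          (pvF s k i (j - 1) + s.getD i 0 * ((((i : Int) + 1) - j) * 2 - (s.length : Int) + k))
      else 1000000000000000000
    min pick (pvF s k i j + s.getD i 0 * (j * 2 - k))

-- B side invariant: the memo only ever stores pvF values.
def pvInv (s : List Int) (k : Int) (memo : PySem.Dict (Int × Int) Int) : Prop :=
  ∀ p r, memo.get? p = some r → ∃ a : Nat, p.1 = (a : Int) ∧ r = pvF s k a p.2

theorem pvSolveB_hit (s : List Int) (n k j : Int) (i : Nat) (r : Int)
    (memo : PySem.Dict (Int × Int) Int) (h : memo.get? ((i : Int), j) = some r) :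
    pvSolveB s n k i j memo = (r, memo) := by
  cases i <;> · rw [pvSolveB]; push_cast at h ⊢; rw [h]

theorem pvSolveB_zero_none (s : List Int) (n k j : Int)
    (memo : PySem.Dict (Int × Int) Int) (h : memo.get? ((0 : Int), j) = none) :
    pvSolveB s n k 0 j memo =
      (if j = 0 then 0 else 1000000000000000000,
        memo.insert ((0 : Int), j) (if j = 0 then 0 else 1000000000000000000)) := by
  rw [pvSolveB]; push_cast; rw [h]

theorem pvSolveB_succ_none (s : List Int) (n k j : Int) (i' : Nat)
    (memo : PySem.Dict (Int × Int) Int) (h : memo.get? ((i' : Int) + 1, j) = none) :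
    pvSolveB s n k (i' + 1) j memo =
      (let p : Int × PySem.Dict (Int × Int) Int :=
        if j ≠ 0 then
          let q := pvSolveB s n k i' (j - 1) memo
          (min 1000000000000000000
              (q.1 + PySem.List.pyGetD s ((i' : Int)) 0 * ((((i' : Int) + 1) - j) * 2 - n + k)),
            q.2)
        else (1000000000000000000, memo)
       let q2 := pvSolveB s n k i' j p.2
       let r := min p.1 (q2.1 + PySem.List.pyGetD s ((i' : Int)) 0 * (j * 2 - k))
       (r, PySem.Dict.insert q2.2 (((i' : Int) + 1), j) r)) := by
  conv_lhs => rw [pvSolveB]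
  push_cast
  rw [h]
theorem pvSolveB_spec (s : List Int) (k : Int) :
    ∀ (i : Nat) (j : Int) (memo : PySem.Dict (Int × Int) Int), pvInv s k memo →
      (pvSolveB s (s.length : Int) k i j memo).1 = pvF s k i j ∧
      pvInv s k (pvSolveB s (s.length : Int) k i j memo).2 := by
  intro i
  induction i with
  | zero =>
    intro j memo hinv
    rcases hm : PySem.Dict.get? memo ((0 : Int), j) with _ | r
    · rw [pvSolveB_zero_none _ _ _ _ _ hm]
      refine ⟨by simp [pvF], ?_⟩
      intro p r hp
      rw [PySem.Dict.get?_insert] at hp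
      split at hp
      · rename_i hpk
        subst hpk
        exact ⟨0, by simp, by simpa [pvF] using (Option.some_inj.mp hp).symm⟩
      · exact hinv p r hp
    · rw [pvSolveB_hit _ _ _ _ _ _ _ (by exact_mod_cast hm)]
      obtain ⟨a, ha, hr⟩ := hinv _ _ hm
      have ha0 : a = 0 := by simpa using ha.symm
      exact ⟨by simp [hr, ha0], hinv⟩
  | succ i' ih =>
    intro j memo hinv
    rcases hm : PySem.Dict.get? memo ((i' : Int) + 1, j) with _ | r
    · rw [pvSolveB_succ_none _ _ _ _ _ _ hm]
      by_cases hj : j = 0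
      · subst hj
        obtain ⟨h1, h2⟩ := ih 0 memo hinv
        simp only [ne_eq, not_true_eq_false, if_false]
        refine ⟨?_, ?_⟩
        · simp only [h1, pvF, PySem.List.pyGetD_natCast]
          simp
        · intro p r hp
          rw [PySem.Dict.get?_insert] at hp
          split at hp
          · rename_i hpk
            subst hpk
            refine ⟨i' + 1, by push_cast; ring, ?_⟩
            have := (Option.some_inj.mp hp).symm
            simp only [h1, PySem.List.pyGetD_natCast] at this
            simpa [pvF] using this
          · exact h2 p r hp
      · obtain ⟨h1, h2⟩ := ih (j - 1) memo hinv
        obtain ⟨h3, h4⟩ := ih j _ h2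
        simp only [ne_eq, hj, not_false_iff, if_pos]
        refine ⟨?_, ?_⟩
        · simp only [h1, h3, PySem.List.pyGetD_natCast]
          conv_rhs => rw [pvF]
          simp [hj]
        · intro p r hp
          rw [PySem.Dict.get?_insert] at hp
          split at hp
          · rename_i hpk
            subst hpk
            refine ⟨i' + 1, by push_cast; ring, ?_⟩
            have := (Option.some_inj.mp hp).symm
            simp only [h1, h3, PySem.List.pyGetD_natCast] at this
            rw [this]
            conv_rhs => rw [pvF]
            simp [hj]
          · exact h4 p r hp
    · rw [pvSolveB_hit _ _ _ _ _ _ _ (by exact_mod_cast hm)]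
      obtain ⟨a, ha, hr⟩ := hinv _ _ hm
      have ha' : a = i' + 1 := by have := ha.symm; simp at this; omega
      exact ⟨by simp [hr, ha'], hinv⟩
-- A side: flat-table index arithmetic.
theorem pvCellLt (W a b L : Nat) (ha : a < L) (hb : b < W) : a * W + b < L * W := by
  calc a * W + b < (a + 1) * W := by ring_nf; omega
    _ ≤ L * W := Nat.mul_le_mul_right W ha

theorem pvCellNe (W a b a' b' : Nat) (hb : b < W) (hb' : b' < W)
    (hne : ¬(a = a' ∧ b = b')) : a * W + b ≠ a' * W + b' := by
  rcases Nat.lt_trichotomy a a' with h | h | h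
  · have : a * W + b < a' * W + b' :=
      lt_of_lt_of_le (pvCellLt W a b a' h hb) (Nat.le_add_right _ _)
    omega
  · subst h; intro heq; exact hne ⟨rfl, by omega⟩
  · have : a' * W + b' < a * W + b :=
      lt_of_lt_of_le (pvCellLt W a' b' a h hb') (Nat.le_add_right _ _)
    omega

theorem pvGetDSetNe (a : Array Int) (i j : Nat) (v : Int) (h : i ≠ j) :
    (a.setIfInBounds i v).getD j 0 = a.getD j 0 := by
  simp [Array.getD_eq_getD_getElem?, h]

theorem pvGetDSetSelf (a : Array Int) (i : Nat) (v : Int) (h : i < a.size) :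
    (a.setIfInBounds i v).getD i 0 = v := by
  simp [Array.getD_eq_getD_getElem?, h]

theorem pvGetDRepl (n i : Nat) (v : Int) (h : i < n) :
    (Array.replicate n v).getD i 0 = v := by
  simp [Array.getD_eq_getD_getElem?, h]

theorem pvStepA_size (s : List Int) (n k i j : Int) (f : Array Int) :
    (pvStepA s n k i j f).size = f.size := by
  simp only [pvStepA]
  by_cases hj : j = 0 <;> simp [hj]

theorem pvStepA_getD_ne (s : List Int) (n k i j : Int) (f : Array Int) (p : Nat)
    (hp : (i * (k + 2) + j).toNat ≠ p) :
    (pvStepA s n k i j f).getD p 0 = f.getD p 0 := by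
  simp only [pvStepA]
  by_cases hj : j = 0
  · subst hj
    simp only [ne_eq, not_true_eq_false, if_false]
    exact pvGetDSetNe _ _ _ _ hp
  · simp only [hj, ne_eq, not_false_iff, if_pos]
    rw [pvGetDSetNe _ _ _ _ hp, pvGetDSetNe _ _ _ _ hp]

theorem pvInnerA (s : List Int) (K m : Nat) (hm : m < s.length + 1) (f : Array Int)
    (hsz : f.size = (s.length + 2) * (K + 2))
    (hdone : ∀ a b : Nat, a ≤ m → b ≤ K → f.getD (a * (K + 2) + b) 0 = pvF s (K : Int) a (b : Int))
    (hfresh : ∀ a b : Nat, m < a → a < s.length + 2 → b < K + 2 →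
      f.getD (a * (K + 2) + b) 0 = 1000000000000000000) :
    ∀ (t : Nat), t ≤ K + 1 →
      ((List.range t).foldl
          (fun f (j : Nat) => pvStepA s (s.length : Int) (K : Int) ((m : Int) + 1) (j : Int) f) f).size
        = (s.length + 2) * (K + 2) ∧
      (∀ a b : Nat, a ≤ m → b ≤ K →
        ((List.range t).foldl
          (fun f (j : Nat) => pvStepA s (s.length : Int) (K : Int) ((m : Int) + 1) (j : Int) f) f).getD
          (a * (K + 2) + b) 0 = pvF s (K : Int) a (b : Int)) ∧
      (∀ b : Nat, b < t →
        ((List.range t).foldl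
          (fun f (j : Nat) => pvStepA s (s.length : Int) (K : Int) ((m : Int) + 1) (j : Int) f) f).getD
          ((m + 1) * (K + 2) + b) 0 = pvF s (K : Int) (m + 1) (b : Int)) ∧
      (∀ b : Nat, t ≤ b → b < K + 2 →
        ((List.range t).foldl
          (fun f (j : Nat) => pvStepA s (s.length : Int) (K : Int) ((m : Int) + 1) (j : Int) f) f).getD
          ((m + 1) * (K + 2) + b) 0 = 1000000000000000000) ∧
      (∀ a b : Nat, m + 1 < a → a < s.length + 2 → b < K + 2 →
        ((List.range t).foldl
          (fun f (j : Nat) => pvStepA s (s.length : Int) (K : Int) ((m : Int) + 1) (j : Int) f) f).getD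
          (a * (K + 2) + b) 0 = 1000000000000000000) := by
  intro t
  induction t with
  | zero =>
    intro _
    refine ⟨hsz, hdone, by simp, ?_, ?_⟩
    · intro b _ hb; exact hfresh (m + 1) b (by omega) (by omega) hb
    · intro a b ha ha' hb; exact hfresh a b (by omega) ha' hb
  | succ t iht =>
    intro ht
    obtain ⟨hsz1, h1, h2, h3, h4⟩ := iht (by omega)
    rw [List.range_succ, List.foldl_append, List.foldl_cons, List.foldl_nil]
    set g := (List.range t).foldl
      (fun f (j : Nat) => pvStepA s (s.length : Int) (K : Int) ((m : Int) + 1) (j : Int) f) f with hg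
    -- index conversions
    have c0 : (((m : Int) + 1) * ((K : Int) + 2) + (t : Int)).toNat = (m + 1) * (K + 2) + t := by
      rw [show ((m : Int) + 1) * ((K : Int) + 2) + (t : Int) = (((m + 1) * (K + 2) + t : Nat) : Int)
        by push_cast; ring, Int.toNat_natCast]
    have cm : ((((m : Int) + 1) - 1) * ((K : Int) + 2) + (t : Int)).toNat = m * (K + 2) + t := by
      rw [show (((m : Int) + 1) - 1) * ((K : Int) + 2) + (t : Int) = ((m * (K + 2) + t : Nat) : Int)
        by push_cast; ring, Int.toNat_natCast]
    have hin : (m + 1) * (K + 2) + t < g.size := by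
      rw [hsz1]; exact pvCellLt _ _ _ _ (by omega) (by omega)
    have hval : (pvStepA s (s.length : Int) (K : Int) ((m : Int) + 1) (t : Int) g).getD
        ((m + 1) * (K + 2) + t) 0 = pvF s (K : Int) (m + 1) (t : Int) := by
      have hgt : g.getD ((m + 1) * (K + 2) + t) 0 = 1000000000000000000 :=
        h3 t le_rfl (by omega)
      have hgm : g.getD (m * (K + 2) + t) 0 = pvF s (K : Int) m (t : Int) :=
        h1 m t le_rfl (by omega)
      have hments : ((m + 1) * (K + 2) + t) ≠ (m * (K + 2) + t) :=
        pvCellNe (K + 2) _ _ _ _ (by omega) (by omega) (by omega)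
      have em : ((m : Int) + 1 - 1) = (m : Int) := by ring
      simp only [pvStepA]
      rw [c0, cm, em, PySem.List.pyGetD_natCast]
      by_cases hjt : (t : Int) = 0
      · rw [if_neg (by simp [hjt])]
        rw [pvGetDSetSelf _ _ _ hin, hgt, hgm]
        conv_rhs => rw [pvF]
        simp [hjt]
      · have ht1 : 1 ≤ t := by omega
        have e2 : ((t : Int) - 1) = ((t - 1 : Nat) : Int) := by omega
        have cm1 : ((m : Int) * ((K : Int) + 2) + ((t : Int) - 1)).toNat
            = m * (K + 2) + (t - 1) := by
          rw [show (m : Int) * ((K : Int) + 2) + ((t : Int) - 1)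
              = ((m * (K + 2) + (t - 1) : Nat) : Int) by push_cast [ht1]; ring, Int.toNat_natCast]
        have hgm1 : g.getD (m * (K + 2) + (t - 1)) 0 = pvF s (K : Int) m ((t - 1 : Nat) : Int) :=
          h1 m (t - 1) le_rfl (by omega)
        rw [if_pos hjt, cm1]
        rw [pvGetDSetSelf _ _ _ (by rw [Array.size_setIfInBounds]; exact hin)]
        rw [pvGetDSetSelf _ _ _ hin]
        rw [pvGetDSetNe _ _ _ _ hments]
        rw [hgt, hgm, hgm1]
        conv_rhs => rw [pvF]
        rw [e2]
        have ht0 : ¬ t = 0 := fun h => hjt (by simp [h])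
        simp [ht0, min_assoc]
    refine ⟨?_, ?_, ?_, ?_, ?_⟩
    · rw [pvStepA_size]; exact hsz1
    · intro a b ha hb
      rw [pvStepA_getD_ne _ _ _ _ _ _ _ (by
        rw [c0]; exact pvCellNe (K + 2) _ _ _ _ (by omega) (by omega) (by omega))]
      exact h1 a b ha hb
    · intro b hb
      by_cases hbt : b = t
      · subst hbt; exact hval
      · rw [pvStepA_getD_ne _ _ _ _ _ _ _ (by
          rw [c0]; exact pvCellNe (K + 2) _ _ _ _ (by omega) (by omega) (by omega))]
        exact h2 b (by omega)
    · intro b hb hb2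
      rw [pvStepA_getD_ne _ _ _ _ _ _ _ (by
        rw [c0]; exact pvCellNe (K + 2) _ _ _ _ (by omega) (by omega) (by omega))]
      exact h3 b (by omega) hb2
    · intro a b ha ha2 hb
      rw [pvStepA_getD_ne _ _ _ _ _ _ _ (by
        rw [c0]; exact pvCellNe (K + 2) _ _ _ _ (by omega) (by omega) (by omega))]
      exact h4 a b ha ha2 hb
theorem pvRangeK (K : Nat) :
    PySem.List.pyRange 0 ((K : Int) + 1) 1 = (List.range (K + 1)).map (fun j : Nat => (j : Int)) := by
  rw [show ((K : Int) + 1) = ((K + 1 : Nat) : Int) by push_cast; ring]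
  rw [PySem.List.pyRange_one]
  simp

theorem pvOuterA (s : List Int) (K : Nat) :
    ∀ (M : Nat), M ≤ s.length →
      ((List.range M).foldl
          (fun f (m : Nat) =>
            (PySem.List.pyRange 0 ((K : Int) + 1) 1).foldl
              (fun f j => pvStepA s (s.length : Int) (K : Int) ((m : Int) + 1) j f) f)
          ((Array.replicate ((((s.length : Int)) + 2) * ((K : Int) + 2)).toNat 1000000000000000000).setIfInBounds
            ((0 : Int) * ((K : Int) + 2) + 0).toNat 0)).size = (s.length + 2) * (K + 2) ∧
      (∀ a b : Nat, a ≤ M → b ≤ K →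
        ((List.range M).foldl
          (fun f (m : Nat) =>
            (PySem.List.pyRange 0 ((K : Int) + 1) 1).foldl
              (fun f j => pvStepA s (s.length : Int) (K : Int) ((m : Int) + 1) j f) f)
          ((Array.replicate ((((s.length : Int)) + 2) * ((K : Int) + 2)).toNat 1000000000000000000).setIfInBounds
            ((0 : Int) * ((K : Int) + 2) + 0).toNat 0)).getD (a * (K + 2) + b) 0
          = pvF s (K : Int) a (b : Int)) ∧
      (∀ a b : Nat, M < a → a < s.length + 2 → b < K + 2 →
        ((List.range M).foldl
          (fun f (m : Nat) =>
            (PySem.List.pyRange 0 ((K : Int) + 1) 1).foldl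
              (fun f j => pvStepA s (s.length : Int) (K : Int) ((m : Int) + 1) j f) f)
          ((Array.replicate ((((s.length : Int)) + 2) * ((K : Int) + 2)).toNat 1000000000000000000).setIfInBounds
            ((0 : Int) * ((K : Int) + 2) + 0).toNat 0)).getD (a * (K + 2) + b) 0
          = 1000000000000000000) := by
  have hzero : ((0 : Int) * ((K : Int) + 2) + 0).toNat = 0 := by norm_num
  have hszn : ((((s.length : Int)) + 2) * ((K : Int) + 2)).toNat = (s.length + 2) * (K + 2) := by
    rw [show (((s.length : Int)) + 2) * ((K : Int) + 2) = (((s.length + 2) * (K + 2) : Nat) : Int)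
      by push_cast; ring, Int.toNat_natCast]
  have hsz0 : ((Array.replicate ((((s.length : Int)) + 2) * ((K : Int) + 2)).toNat
      (1000000000000000000 : Int)).setIfInBounds ((0 : Int) * ((K : Int) + 2) + 0).toNat 0).size
      = (s.length + 2) * (K + 2) := by
    rw [Array.size_setIfInBounds, Array.size_replicate, hszn]
  intro M
  induction M with
  | zero =>
    intro _
    refine ⟨hsz0, ?_, ?_⟩
    · intro a b ha hb
      have ha0 : a = 0 := by omega
      subst ha0
      rw [hzero]
      simp only [List.range_zero, List.foldl_nil, Nat.zero_mul, Nat.zero_add]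
      by_cases hb0 : b = 0
      · subst hb0
        rw [pvGetDSetSelf _ _ _ (by rw [Array.size_replicate, hszn]; positivity)]
        simp [pvF]
      · rw [pvGetDSetNe _ _ _ _ (by omega)]
        rw [pvGetDRepl _ _ _ (by
          rw [hszn]
          have := pvCellLt (K + 2) 0 b (s.length + 2) (by omega) (by omega)
          omega)]
        simp [pvF, hb0]
    · intro a b ha ha2 hb
      rw [hzero]
      simp only [List.range_zero, List.foldl_nil]
      have hlow : 1 * (K + 2) ≤ a * (K + 2) := Nat.mul_le_mul_right _ (by omega)
      rw [pvGetDSetNe _ _ _ _ (by omega)]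
      rw [pvGetDRepl _ _ _ (by rw [hszn]; exact pvCellLt _ _ _ _ ha2 hb)]
  | succ M ihm =>
    intro hM
    obtain ⟨hsz1, c1, c4⟩ := ihm (by omega)
    rw [List.range_succ, List.foldl_append, List.foldl_cons, List.foldl_nil]
    generalize hg : (List.range M).foldl
        (fun f (m : Nat) =>
          (PySem.List.pyRange 0 ((K : Int) + 1) 1).foldl
            (fun f j => pvStepA s (s.length : Int) (K : Int) ((m : Int) + 1) j f) f)
        ((Array.replicate ((((s.length : Int)) + 2) * ((K : Int) + 2)).toNat 1000000000000000000).setIfInBounds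
          ((0 : Int) * ((K : Int) + 2) + 0).toNat 0) = h0 at hsz1 c1 c4 ⊢
    rw [pvRangeK, List.foldl_map]
    obtain ⟨d0, d1, d2, d3, d4⟩ :=
      pvInnerA s K M (by omega) h0 hsz1 c1
        (fun a b ha ha2 hb => c4 a b ha ha2 hb) (K + 1) le_rfl
    refine ⟨d0, ?_, ?_⟩
    · intro a b ha hb
      rcases Nat.lt_or_ge a (M + 1) with ha' | ha'
      · exact d1 a b (by omega) hb
      · have haM : a = M + 1 := by omega
        subst haM
        exact d2 b (by omega)
    · intro a b ha ha2 hb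
      exact d4 a b ha ha2 hb

theorem pvInvEmpty (s : List Int) (k : Int) : pvInv s k (PySem.Dict.empty) := by
  intro p r hp
  rw [PySem.Dict.get?_empty] at hp
  cases hp

theorem pvMain : ∀ (k : Int) (arr : List Int), 0 ≤ k → fairCut k arr = fairCut_alt k arr := by
  intro k arr hk
  obtain ⟨K, rfl⟩ : ∃ K : Nat, k = (K : Int) := ⟨k.toNat, (Int.toNat_of_nonneg hk).symm⟩
  have hB : fairCut_alt (K : Int) arr =
      pvF (PySem.List.sorted arr id) (K : Int) (PySem.List.sorted arr id).length (K : Int) := by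
    unfold fairCut_alt
    exact (pvSolveB_spec _ _ _ _ _ (pvInvEmpty _ _)).1
  rw [hB]
  simp only [fairCut]
  set s := PySem.List.sorted arr id with hs
  have hlen : (((s.length : Int) + 1 - 1)).toNat = s.length := by omega
  rw [show PySem.List.pyRange 1 ((s.length : Int) + 1) 1
      = (List.range s.length).map (fun a : Nat => 1 + (a : Int)) by
    rw [PySem.List.pyRange_one, hlen]]
  rw [List.foldl_map]
  simp only [show ∀ t : Nat, (1 : Int) + (t : Int) = (t : Int) + 1 from fun t => by ring]
  have hfin : ((s.length : Int) * ((K : Int) + 2) + (K : Int)).toNat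
      = s.length * (K + 2) + K := by
    rw [show (s.length : Int) * ((K : Int) + 2) + (K : Int)
        = ((s.length * (K + 2) + K : Nat) : Int) by push_cast; ring, Int.toNat_natCast]
  rw [hfin]
  exact (pvOuterA s K s.length le_rfl).2.1 s.length K le_rfl le_rfl

-- ===== VERDICT (by name: the statement is the Claim_ definition above) =====
theorem fairCut_spec : Claim_equal_fairCut := by
  intro k arr _ hk
  exact pvMain k arr hk
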